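-- pv_equiv track=rewrite | github.com/Alexdruso/adventofcode | src/adventofcode/year_2023/day_03_2023.py | _numbers_to_operators
-- ===== SOURCE A (Python) =====
-- from collections.abc import Iterator
--
-- directions = [(1, 0), (-1, 0), (0, 1), (0, -1), (1, 1), (1, -1), (-1, 1), (-1, -1)]
--
-- def _adjacent_coordinates(row: int, column: int) -> Iterator[tuple[int, int]]:
--     for dr, dc in directions:
--         new_row, new_column = row + dr, column + dc
--         yield new_row, new_column
--
-- def _numbers_to_operators(row_idx: int, row: str, symbols: set[tuple[int, int]]) -> Iterator[
--     tuple[int, set[tuple[int, int]]]]: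
--     linked_symbols: set[tuple[int, int]] = set()
--     temp = ''
--     for index in range(len(row)):
--         symbol = row[index]
--         if ord(symbol) in range(ord('0'), ord('9') + 1):
--             temp += symbol
--             linked_symbols |= {
--                 x
--                 for x in _adjacent_coordinates(row_idx, index)
--                 if x in symbols
--             }
--         else:
--             if len(linked_symbols) > 0:
--                 yield int(temp), linked_symbols
--             linked_symbols = set()
--             temp = ''
--     if len(linked_symbols) > 0:
--         yield int(temp), linked_symbols
-- ===== SOURCE B (Python) =====
-- import re
-- from collections.abc import Iterator
--
-- directions = [(1, 0), (-1, 0), (0, 1), (0, -1), (1, 1), (1, -1), (-1, 1), (-1, -1)]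
--
-- def _adjacent_coordinates(row: int, column: int) -> Iterator[tuple[int, int]]:
--     for dr, dc in directions:
--         yield row + dr, column + dc
--
-- def _numbers_to_operators(row_idx: int, row: str, symbols: set[tuple[int, int]]) -> Iterator[
--     tuple[int, set[tuple[int, int]]]]:
--     for match in re.finditer(r'[0-9]+', row):
--         linked_symbols: set[tuple[int, int]] = set()
--         for column in range(match.start(), match.end()):
--             linked_symbols |= {
--                 x
--                 for x in _adjacent_coordinates(row_idx, column)
--                 if x in symbols
--             }
--         if linked_symbols:
--             yield int(match.group()), linked_symbols
-- ===== Notes on version B (the rewrite author's own statement) =====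
-- stated objective: idiomatic
-- what changed: Replaces the interleaved accumulate/flush character loop carrying (temp, linked_symbols) state with re.finditer over maximal digit runs: for each run, the adjacency set is collected over its column span and the pair yielded if nonempty.
import Mathlib
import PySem

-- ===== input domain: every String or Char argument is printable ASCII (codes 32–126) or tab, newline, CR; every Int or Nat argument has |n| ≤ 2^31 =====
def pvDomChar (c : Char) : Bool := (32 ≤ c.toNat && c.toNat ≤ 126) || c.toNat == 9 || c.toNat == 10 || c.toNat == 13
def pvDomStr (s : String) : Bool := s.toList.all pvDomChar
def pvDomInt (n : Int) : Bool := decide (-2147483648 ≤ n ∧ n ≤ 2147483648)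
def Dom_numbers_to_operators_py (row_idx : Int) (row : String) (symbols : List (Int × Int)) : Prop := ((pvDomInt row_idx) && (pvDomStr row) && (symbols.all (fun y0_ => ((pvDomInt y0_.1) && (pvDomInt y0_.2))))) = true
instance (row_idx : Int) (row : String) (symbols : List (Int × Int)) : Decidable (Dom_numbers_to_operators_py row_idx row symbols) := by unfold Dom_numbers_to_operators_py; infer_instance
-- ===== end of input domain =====

-- B replaces A's interleaved accumulate/flush character loop with a finditer-style
-- split into maximal digit runs, collecting each run's adjacency set over its column span (idiomatic decomposition).

-- shared module context: directions and _adjacent_coordinates (both Python files define them)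
def pvDirections : List (Int × Int) := [(1,0),(-1,0),(0,1),(0,-1),(1,1),(1,-1),(-1,1),(-1,-1)]
def pvAdjacent (r c : Int) : List (Int × Int) := pvDirections.map (fun d => (r + d.1, c + d.2))
-- ord(symbol) in range(ord('0'), ord('9')+1)  /  the character class [0-9]
def pvIsDigit (c : Char) : Bool := 48 ≤ c.toNat && c.toNat ≤ 57
-- {x for x in _adjacent_coordinates(row_idx, column) if x in symbols}
def pvLinkAt (row_idx : Int) (symbols : List (Int × Int)) (col : Int) : PySem.Set (Int × Int) :=
  PySem.Set.ofList ((pvAdjacent row_idx col).filter (fun x => decide (x ∈ symbols)))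

-- ===== PORT A =====
-- the `for index in range(len(row))` loop, state = (linked_symbols, temp); result list replaces the yields
def pvALoop (row_idx : Int) (symbols : List (Int × Int)) :
    List Char → Int → PySem.Set (Int × Int) → List Char → List (Int × (List (Int × Int)))
  | [], _, linked, temp =>
      if PySem.Set.len linked > 0 then [((PySem.Int.ofChars? temp).getD 0, linked)] else []
  | c :: cs, i, linked, temp =>
      if pvIsDigit c then
        pvALoop row_idx symbols cs (i + 1)
          (PySem.Set.union linked (pvLinkAt row_idx symbols i)) (temp ++ [c])
      else
        if PySem.Set.len linked > 0 then
          ((PySem.Int.ofChars? temp).getD 0, linked) :: pvALoop row_idx symbols cs (i + 1) PySem.Set.empty []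
        else
          pvALoop row_idx symbols cs (i + 1) PySem.Set.empty []

def numbers_to_operators_py (row_idx : Int) (row : String) (symbols : List (Int × Int)) : List (Int × (List (Int × Int))) :=
  pvALoop row_idx symbols row.toList 0 PySem.Set.empty []

-- ===== PORT B =====
-- finditer(r'[0-9]+', row): scan for the next maximal digit run, handle it whole, continue after it
def pvBGo (row_idx : Int) (symbols : List (Int × Int)) :
    List Char → Int → List (Int × (List (Int × Int)))
  | [], _ => []
  | c :: cs, i =>
      if pvIsDigit c then
        -- the match: digit run ds spanning columns [i, i + ds.length)
        let ds := c :: cs.takeWhile pvIsDigit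
        let linked := (PySem.List.pyRange i (i + (ds.length : Int)) 1).foldl
          (fun s col => PySem.Set.union s (pvLinkAt row_idx symbols col)) PySem.Set.empty
        (if PySem.Set.len linked > 0 then [((PySem.Int.ofChars? ds).getD 0, linked)] else [])
          ++ pvBGo row_idx symbols (cs.dropWhile pvIsDigit) (i + (ds.length : Int))
      else
        pvBGo row_idx symbols cs (i + 1)
  termination_by cs => cs.length
  decreasing_by
  · exact Nat.lt_succ_of_le (List.length_dropWhile_le _ _)
  · simp

def numbers_to_operators_py_alt (row_idx : Int) (row : String) (symbols : List (Int × Int)) : List (Int × (List (Int × Int))) :=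
  pvBGo row_idx symbols row.toList 0

-- ===== PRECONDITION & SPEC =====
def Spec_numbers_to_operators_py (row_idx : Int) (row : String) (symbols : List (Int × Int)) (out : List (Int × (List (Int × Int)))) : Prop := out = numbers_to_operators_py_alt row_idx row symbols
instance (row_idx : Int) (row : String) (symbols : List (Int × Int)) (out : List (Int × (List (Int × Int)))) : Decidable (Spec_numbers_to_operators_py row_idx row symbols out) := by unfold Spec_numbers_to_operators_py; infer_instance

-- ===== CLAIM (what is proved, stated in full; the proofs are below) =====
def Claim_equal_numbers_to_operators_py : Prop := ∀ (row_idx : Int) (row : String) (symbols : List (Int × Int)), Dom_numbers_to_operators_py row_idx row symbols → Spec_numbers_to_operators_py row_idx row symbols (numbers_to_operators_py row_idx row symbols)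

-- ===== LEMMAS AND PROOFS =====

-- A's loop from any state = emit the pending run (if any symbols were linked), then continue clean after it
theorem pvALoop_run (row_idx : Int) (symbols : List (Int × Int)) :
    ∀ (cs : List Char) (i : Int) (linked : PySem.Set (Int × Int)) (temp : List Char),
      pvALoop row_idx symbols cs i linked temp =
        (let ds := cs.takeWhile pvIsDigit
         let L := (PySem.List.pyRange i (i + (ds.length : Int)) 1).foldl
            (fun s col => PySem.Set.union s (pvLinkAt row_idx symbols col)) linked
         (if PySem.Set.len L > 0 then [((PySem.Int.ofChars? (temp ++ ds)).getD 0, L)] else [])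
           ++ pvALoop row_idx symbols (cs.dropWhile pvIsDigit) (i + (ds.length : Int)) PySem.Set.empty []) := by
  intro cs
  induction cs with
  | nil =>
      intro i linked temp
      simp [pvALoop, PySem.List.pyRange_one_eq_nil (le_refl i)]
  | cons c cs ih =>
      intro i linked temp
      by_cases h : pvIsDigit c = true
      · have hcons : List.takeWhile pvIsDigit (c :: cs) = c :: cs.takeWhile pvIsDigit := by
          simp [List.takeWhile, h]
        have hdrop : List.dropWhile pvIsDigit (c :: cs) = cs.dropWhile pvIsDigit := by
          simp [List.dropWhile, h]
        have hlen : (i + ((c :: cs.takeWhile pvIsDigit).length : Int)) = (i + 1) + ((cs.takeWhile pvIsDigit).length : Int) := by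
          simp; ring
        have hrange : PySem.List.pyRange i (i + ((c :: cs.takeWhile pvIsDigit).length : Int)) 1
            = i :: PySem.List.pyRange (i + 1) (i + ((c :: cs.takeWhile pvIsDigit).length : Int)) 1 := by
          refine PySem.List.pyRange_one_cons ?_
          have : (0:Int) < ((c :: cs.takeWhile pvIsDigit).length : Int) := by
            exact_mod_cast Nat.succ_pos _
          omega
        simp only [pvALoop, h, if_pos, hcons, hdrop]
        rw [ih (i+1) (PySem.Set.union linked (pvLinkAt row_idx symbols i)) (temp ++ [c])]
        simp only [hlen]
        rw [show PySem.List.pyRange i (i + 1 + ((cs.takeWhile pvIsDigit).length : Int)) 1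
            = i :: PySem.List.pyRange (i + 1) (i + 1 + ((cs.takeWhile pvIsDigit).length : Int)) 1 from
          PySem.List.pyRange_one_cons (by have := Int.natCast_nonneg (cs.takeWhile pvIsDigit).length; omega)]
        simp
      · have hcons : List.takeWhile pvIsDigit (c :: cs) = [] := by
          simp [List.takeWhile, h]
        have hdrop : List.dropWhile pvIsDigit (c :: cs) = c :: cs := by
          simp [List.dropWhile, h]
        simp only [pvALoop, h]
        simp only [hcons, hdrop, List.length_nil, Int.ofNat_zero]
        rw [PySem.List.pyRange_one_eq_nil (by omega : i + (0:Int) ≤ i)]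
        rw [show i + (0:Int) = i from add_zero i]
        have hzero : pvALoop row_idx symbols (c :: cs) i PySem.Set.empty [] =
            pvALoop row_idx symbols cs (i + 1) PySem.Set.empty [] := by
          simp [pvALoop, h, PySem.Set.len, PySem.Set.empty]
        simp only [List.foldl_nil]
        rw [hzero]
        by_cases hl : 0 < List.length linked <;> simp [hl]

-- from the clean state, A's run-by-run unfolding is exactly B
theorem pvALoop_eq_pvBGo (row_idx : Int) (symbols : List (Int × Int)) :
    ∀ (n : Nat) (cs : List Char), cs.length ≤ n → ∀ (i : Int),
      pvALoop row_idx symbols cs i PySem.Set.empty [] = pvBGo row_idx symbols cs i := by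
  intro n
  induction n with
  | zero =>
      intro cs hcs i
      have : cs = [] := List.length_eq_zero_iff.mp (Nat.le_zero.mp hcs)
      subst this
      simp [pvALoop, pvBGo, PySem.Set.len, PySem.Set.empty]
  | succ n ih =>
      intro cs hcs i
      cases cs with
      | nil => simp [pvALoop, pvBGo, PySem.Set.len, PySem.Set.empty]
      | cons c cs =>
          by_cases h : pvIsDigit c = true
          · rw [pvALoop_run]
            simp only [List.takeWhile, List.dropWhile, h]
            rw [ih (cs.dropWhile pvIsDigit)
                (le_trans (List.length_dropWhile_le _ _) (Nat.le_of_succ_le_succ hcs))]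
            conv_rhs => rw [pvBGo]
            simp [h]
          · have : pvALoop row_idx symbols (c :: cs) i PySem.Set.empty [] =
                pvALoop row_idx symbols cs (i + 1) PySem.Set.empty [] := by
              simp [pvALoop, h, PySem.Set.len, PySem.Set.empty]
            rw [this, ih cs (Nat.le_of_succ_le_succ hcs)]
            conv_rhs => rw [pvBGo]
            simp [h]

-- ===== VERDICT (by name: the statement is the Claim_ definition above) =====
theorem numbers_to_operators_py_spec : Claim_equal_numbers_to_operators_py := by
  intro row_idx row symbols _
  unfold Spec_numbers_to_operators_py numbers_to_operators_py numbers_to_operators_py_alt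
  exact pvALoop_eq_pvBGo row_idx symbols row.toList.length row.toList (le_refl _) 0
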